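-- pv_equiv track=rewrite | github.com/river-computer/rnn-t | src/training/silent_adapt.py | transfer_labels_via_dtw
-- ===== SOURCE A (Python) =====
-- from typing import Optional, Dict, Any, List, Tuple
--
-- def transfer_labels_via_dtw(
--     alignment: List[Tuple[int, int]],
--     voiced_labels: List[int],
--     voiced_length: int,
--     silent_length: int,
-- ) -> List[int]:
--     """Transfer labels from voiced to silent via DTW alignment.
--
--     Args:
--         alignment: List of (silent_idx, voiced_idx) pairs from DTW
--         voiced_labels: Frame-level labels for voiced sequence
--         voiced_length: Length of voiced encoder output
--         silent_length: Length of silent encoder output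
--
--     Returns:
--         Transferred labels for silent sequence
--     """
--     # Create mapping from voiced frames to labels
--     # After 4x subsample, need to map encoder frames to original labels
--     voiced_frame_labels = voiced_labels[:voiced_length]
--
--     # Transfer labels via alignment
--     silent_labels = [0] * silent_length  # Initialize with blanks
--
--     for s_idx, v_idx in alignment:
--         if s_idx < silent_length and v_idx < len(voiced_frame_labels):
--             silent_labels[s_idx] = voiced_frame_labels[v_idx]
--
--     return silent_labels
-- ===== SOURCE B (Python) =====
-- def transfer_labels_via_dtw(alignment, voiced_labels, voiced_length, silent_length):
--     """Transfer labels from voiced to silent via DTW alignment.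
--
--     Output-driven version: for each silent frame index, scan the alignment
--     backwards and return the label of the first (i.e. latest) pair deciding it;
--     no target buffer is preallocated or mutated.
--     """
--     vfl = voiced_labels[:voiced_length]
--     n = len(vfl)
--
--     def label_for(i):
--         for s_idx, v_idx in reversed(alignment):
--             if s_idx == i and 0 <= v_idx < n:
--                 return vfl[v_idx]
--         return 0
--
--     return [label_for(i) for i in range(silent_length)]
-- ===== Notes on version B (the rewrite author's own statement) =====
-- stated objective: alternative
-- what changed: B inverts the control flow: instead of one forward pass over the alignment mutating a preallocated zero list (last write wins), B computes each output position independently by scanning the alignment backwards for the latest pair that targets that silent index, with no mutable buffer at all.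
-- outside the precondition, e.g. on transfer_labels_via_dtw([(-1, 0)], [5], 1, 2): A returns [0, 5], B returns [0, 0]; on transfer_labels_via_dtw([(0, -1)], [5, 6], 2, 1): A returns [6], B returns [0]
import Mathlib
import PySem

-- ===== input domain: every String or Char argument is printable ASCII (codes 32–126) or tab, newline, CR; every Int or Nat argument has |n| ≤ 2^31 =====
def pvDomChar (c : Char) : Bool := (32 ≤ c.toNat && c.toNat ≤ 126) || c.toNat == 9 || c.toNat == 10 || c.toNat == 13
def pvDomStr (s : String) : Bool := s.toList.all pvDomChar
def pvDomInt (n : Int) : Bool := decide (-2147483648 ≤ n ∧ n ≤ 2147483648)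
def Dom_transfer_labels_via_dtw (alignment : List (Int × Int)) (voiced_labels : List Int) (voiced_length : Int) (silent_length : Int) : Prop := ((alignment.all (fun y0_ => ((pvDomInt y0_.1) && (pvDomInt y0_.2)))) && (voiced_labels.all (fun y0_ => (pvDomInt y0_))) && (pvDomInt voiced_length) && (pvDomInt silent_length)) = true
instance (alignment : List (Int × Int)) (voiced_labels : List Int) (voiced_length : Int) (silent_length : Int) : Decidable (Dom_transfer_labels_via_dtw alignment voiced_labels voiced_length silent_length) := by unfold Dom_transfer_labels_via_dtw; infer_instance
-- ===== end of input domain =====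

-- B inverts the control flow: each output position is computed independently by scanning the
-- alignment backwards for the latest pair targeting it, instead of mutating a preallocated
-- zero list in one forward pass (alternative decomposition; B is not faster).

-- ===== PORT A =====
def transfer_labels_via_dtw (alignment : List (Int × Int)) (voiced_labels : List Int) (voiced_length : Int) (silent_length : Int) : List Int :=
  let voiced_frame_labels := PySem.List.slice voiced_labels none (some voiced_length)
  let silent_labels : List Int := List.replicate silent_length.toNat 0
  alignment.foldl (fun acc p =>
    if p.1 < silent_length ∧ p.2 < (voiced_frame_labels.length : Int) then
      -- silent_labels[s_idx] = voiced_frame_labels[v_idx]; the raising cases are outside Pre_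
      PySem.List.pySetD acc p.1 (PySem.List.pyGetD voiced_frame_labels p.2 0)
    else acc) silent_labels

-- ===== PORT B =====
-- B's inner 'for … in reversed(alignment): if …: return …' loop, step for step
def pvLabelFor (vfl : List Int) (i : Int) : List (Int × Int) → Int
  | [] => 0
  | p :: rest =>
      if p.1 = i ∧ 0 ≤ p.2 ∧ p.2 < (vfl.length : Int) then PySem.List.pyGetD vfl p.2 0
      else pvLabelFor vfl i rest

def transfer_labels_via_dtw_alt (alignment : List (Int × Int)) (voiced_labels : List Int) (voiced_length : Int) (silent_length : Int) : List Int :=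
  let vfl := PySem.List.slice voiced_labels none (some voiced_length)
  (PySem.List.pyRange 0 silent_length 1).map (fun i => pvLabelFor vfl i alignment.reverse)

-- ===== PRECONDITION & SPEC =====
-- len(voiced_labels[:voiced_length]) as a closed form on the inputs
def pvLenVfl (voiced_labels : List Int) (voiced_length : Int) : Int :=
  if 0 ≤ voiced_length then min voiced_length (voiced_labels.length : Int)
  else max ((voiced_labels.length : Int) + voiced_length) 0

-- Pre_ excludes alignments containing a bounds-guard-passing pair with a negative silent or
-- voiced index: DTW alignments carry nonnegative frame indices, so such pairs are malformed
-- input, on which A either raises IndexError or does a Python negative-index wraparound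
-- write/read that is an artefact of list indexing.
def Pre_transfer_labels_via_dtw (alignment : List (Int × Int)) (voiced_labels : List Int) (voiced_length : Int) (silent_length : Int) : Prop :=
  ∀ p ∈ alignment, p.1 < silent_length → p.2 < pvLenVfl voiced_labels voiced_length → 0 ≤ p.1 ∧ 0 ≤ p.2
instance (alignment : List (Int × Int)) (voiced_labels : List Int) (voiced_length : Int) (silent_length : Int) : Decidable (Pre_transfer_labels_via_dtw alignment voiced_labels voiced_length silent_length) := by unfold Pre_transfer_labels_via_dtw; infer_instance

def pvWitness_transfer_labels_via_dtw : (List (Int × Int)) × List Int × Int × Int := ([(0, 0), (1, 0)], [7], 1, 2)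

def Spec_transfer_labels_via_dtw (alignment : List (Int × Int)) (voiced_labels : List Int) (voiced_length : Int) (silent_length : Int) (out : List Int) : Prop := out = transfer_labels_via_dtw_alt alignment voiced_labels voiced_length silent_length
instance (alignment : List (Int × Int)) (voiced_labels : List Int) (voiced_length : Int) (silent_length : Int) (out : List Int) : Decidable (Spec_transfer_labels_via_dtw alignment voiced_labels voiced_length silent_length out) := by unfold Spec_transfer_labels_via_dtw; infer_instance

-- ===== CLAIM =====
def Claim_equal_transfer_labels_via_dtw : Prop := ∀ (alignment : List (Int × Int)) (voiced_labels : List Int) (voiced_length : Int) (silent_length : Int), Dom_transfer_labels_via_dtw alignment voiced_labels voiced_length silent_length → Pre_transfer_labels_via_dtw alignment voiced_labels voiced_length silent_length → Spec_transfer_labels_via_dtw alignment voiced_labels voiced_length silent_length (transfer_labels_via_dtw alignment voiced_labels voiced_length silent_length)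

-- ===== LEMMAS AND PROOFS =====

lemma pvLenVfl_eq_slice_length (vl : List Int) (k : Int) :
    ((PySem.List.slice vl none (some k)).length : Int) = pvLenVfl vl k := by
  unfold pvLenVfl
  simp [PySem.List.slice, PySem.List.clampIdx]
  split_ifs <;> omega

-- pvLabelFor with a generalized default, used to run the backward scan by induction
def pvLabelForD (vfl : List Int) (i : Int) (d : Int) : List (Int × Int) → Int
  | [] => d
  | p :: rest =>
      if p.1 = i ∧ 0 ≤ p.2 ∧ p.2 < (vfl.length : Int) then PySem.List.pyGetD vfl p.2 0
      else pvLabelForD vfl i d rest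

lemma pvLabelForD_zero (vfl : List Int) (i : Int) (xs : List (Int × Int)) :
    pvLabelForD vfl i 0 xs = pvLabelFor vfl i xs := by
  induction xs with
  | nil => rfl
  | cons p rest ih => simp [pvLabelForD, pvLabelFor, ih]

lemma pvLabelForD_append_singleton (vfl : List Int) (i d : Int) (xs : List (Int × Int)) (p : Int × Int) :
    pvLabelForD vfl i d (xs ++ [p]) =
      pvLabelForD vfl i
        (if p.1 = i ∧ 0 ≤ p.2 ∧ p.2 < (vfl.length : Int) then PySem.List.pyGetD vfl p.2 0 else d)
        xs := by
  induction xs with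
  | nil => simp [pvLabelForD]
  | cons q rest ih => simp [pvLabelForD, ih]

-- loop invariant: the value A's forward in-place pass leaves at index j equals B's backward
-- scan with the current buffer value as default
lemma pv_loop_inv (slen : Int) (vfl : List Int)
    (al : List (Int × Int)) (acc : List Int)
    (hp : ∀ p ∈ al, p.1 < slen → p.2 < (vfl.length : Int) → 0 ≤ p.1 ∧ 0 ≤ p.2)
    (hlen : acc.length = slen.toNat) :
    (al.foldl (fun acc p =>
        if p.1 < slen ∧ p.2 < (vfl.length : Int) then
          PySem.List.pySetD acc p.1 (PySem.List.pyGetD vfl p.2 0)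
        else acc) acc).length = slen.toNat ∧
    ∀ j : Nat, j < slen.toNat →
      (al.foldl (fun acc p =>
        if p.1 < slen ∧ p.2 < (vfl.length : Int) then
          PySem.List.pySetD acc p.1 (PySem.List.pyGetD vfl p.2 0)
        else acc) acc).getD j 0 =
      pvLabelForD vfl (j : Int) (acc.getD j 0) al.reverse := by
  induction al generalizing acc with
  | nil => exact ⟨hlen, by intro j hj; simp [pvLabelForD]⟩
  | cons p al ih =>
    simp only [List.foldl_cons, List.reverse_cons]
    by_cases hg : p.1 < slen ∧ p.2 < (vfl.length : Int)
    · obtain ⟨hs0, hv0⟩ := hp p (List.mem_cons_self) hg.1 hg.2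
      have hset : PySem.List.pySetD acc p.1 (PySem.List.pyGetD vfl p.2 0)
          = acc.set p.1.toNat (PySem.List.pyGetD vfl p.2 0) := by
        rw [show p.1 = ((p.1.toNat : Nat) : Int) by omega, PySem.List.pySetD_natCast]
        congr 1
      rw [if_pos hg, hset]
      obtain ⟨hl, hr⟩ := ih (acc.set p.1.toNat (PySem.List.pyGetD vfl p.2 0)) (fun q hq => hp q (List.mem_cons_of_mem _ hq)) (by rw [List.length_set]; exact hlen)
      refine ⟨hl, ?_⟩
      intro j hj
      rw [hr j hj, pvLabelForD_append_singleton]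
      by_cases hji : p.1 = (j : Int)
      · have hj' : j = p.1.toNat := by omega
        rw [if_pos ⟨hji, hv0, hg.2⟩, hj',
          List.getD_eq_getElem _ _ (by simp only [List.length_set, hlen]; omega),
          List.getElem_set_self]
      · have : ¬ (p.1 = (j : Int) ∧ 0 ≤ p.2 ∧ p.2 < (vfl.length : Int)) := by tauto
        rw [if_neg this, List.getD_eq_getElem?_getD, List.getElem?_set_ne (by omega),
          ← List.getD_eq_getElem?_getD]
    · rw [if_neg hg]
      obtain ⟨hl, hr⟩ := ih _ (fun q hq => hp q (List.mem_cons_of_mem _ hq)) hlen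
      refine ⟨hl, ?_⟩
      intro j hj
      rw [hr j hj, pvLabelForD_append_singleton]
      have : ¬ (p.1 = (j : Int) ∧ 0 ≤ p.2 ∧ p.2 < (vfl.length : Int)) := by
        rintro ⟨h1, h2, h3⟩; exact hg ⟨by omega, h3⟩
      rw [if_neg this]

-- ===== VERDICT =====
theorem transfer_labels_via_dtw_spec : Claim_equal_transfer_labels_via_dtw := by
  intro al vl vlen slen _ hpre
  unfold Spec_transfer_labels_via_dtw
  unfold transfer_labels_via_dtw transfer_labels_via_dtw_alt
  simp only []
  set vfl := PySem.List.slice vl none (some vlen) with hvfl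
  have hp : ∀ p ∈ al, p.1 < slen → p.2 < (vfl.length : Int) → 0 ≤ p.1 ∧ 0 ≤ p.2 := by
    intro p hmem h1 h2
    exact hpre p hmem h1 (by rwa [← pvLenVfl_eq_slice_length])
  obtain ⟨hlen, hrel⟩ := pv_loop_inv slen vfl al (List.replicate slen.toNat 0) hp (by simp)
  apply List.ext_getElem
  · rw [hlen]; simp [PySem.List.length_pyRange_one]
  · intro j h1 h2
    rw [← List.getD_eq_getElem _ 0 h1, hrel j (by omega),
      List.getElem_map, PySem.List.getElem_pyRange_one]
    simp [pvLabelForD_zero]
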